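-- pv_equiv track=rewrite | github.com/sherzodburxonov/list_search | find03_max_min_sum.py | find_max_min_sum
-- ===== SOURCE A (Python) =====
-- def find_max_min_sum(data):
--     """
--     Given the list of numbers, return the sum of the maximum and minimum numbers in the list
--     args:
--         data: list of numbers
--     returns: sum of the maximum and minimum numbers in the list
--     """
--     n=0
--     KATTASI=data[0]
--     kichkinasi=data[0]
--     while n<len(data):
--         if KATTASI<data[n]:
--             KATTASI=data[n]
--         if kichkinasi>data[n]:
--             kichkinasi=data[n]
--         n=n+1
--     return kichkinasi+KATTASI
-- ===== SOURCE B (Python) =====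
-- def find_max_min_sum(data):
--     s = sorted(data)
--     return s[0] + s[-1]
-- ===== Notes on version B (the rewrite author's own statement) =====
-- stated objective: simpler
-- what changed: Replaces the explicit index-based running-min/max while loop with sort-then-read-extremes: build a sorted copy and add its first and last elements.
import Mathlib
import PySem

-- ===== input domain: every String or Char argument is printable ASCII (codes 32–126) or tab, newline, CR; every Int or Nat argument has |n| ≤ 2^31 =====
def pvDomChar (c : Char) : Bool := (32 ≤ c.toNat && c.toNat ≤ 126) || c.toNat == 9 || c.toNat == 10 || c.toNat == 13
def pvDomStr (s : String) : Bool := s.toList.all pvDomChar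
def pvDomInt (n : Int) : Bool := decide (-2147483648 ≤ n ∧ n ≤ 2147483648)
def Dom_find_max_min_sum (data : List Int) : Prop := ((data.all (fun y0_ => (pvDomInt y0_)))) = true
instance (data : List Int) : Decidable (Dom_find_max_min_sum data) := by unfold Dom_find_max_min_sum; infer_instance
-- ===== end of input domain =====

-- B replaces A's index-based running-min/max while loop with sort-then-read-extremes (simpler decomposition, same return values).


-- ===== PORT A =====
-- A: KATTASI = kichkinasi = first element; while-loop over indices updating the running max (KATTASI)
-- and min (kichkinasi); return kichkinasi + KATTASI.  Reading the first element raises IndexError on an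
-- empty list (excluded by Pre_; the nil branch value here is arbitrary).  The while loop visits every
-- index in order, i.e. each element once.
def pvStepA (p : Int × Int) (x : Int) : Int × Int :=
  let KATTASI := if p.1 < x then x else p.1
  let kichkinasi := if p.2 > x then x else p.2
  (KATTASI, kichkinasi)

def find_max_min_sum (data : List Int) : Int :=
  match data with
  | [] => 0
  | d0 :: _ =>
    let st := data.foldl pvStepA (d0, d0)
    st.2 + st.1

-- ===== PORT B =====
-- B: sorted copy; sum of its first element (index 0) and last element (index -1).
def find_max_min_sum_alt (data : List Int) : Int :=
  let s := PySem.List.sorted data (fun x => x) false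
  match PySem.List.pyGet? s 0, PySem.List.pyGet? s (-1) with
  | some a, some b => a + b
  | _, _ => 0

-- ===== PRECONDITION & SPEC =====
-- A raises IndexError on the empty list (reading its first element); B raises there too.
def Pre_find_max_min_sum (data : List Int) : Prop := data ≠ []
instance (data : List Int) : Decidable (Pre_find_max_min_sum data) := by unfold Pre_find_max_min_sum; infer_instance
def pvWitness_find_max_min_sum : List Int := [3, -1, 4]

def Spec_find_max_min_sum (data : List Int) (out : Int) : Prop := out = find_max_min_sum_alt data
instance (data : List Int) (out : Int) : Decidable (Spec_find_max_min_sum data out) := by unfold Spec_find_max_min_sum; infer_instance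

-- ===== CLAIM (what is proved, stated in full; the proofs are below) =====
def Claim_equal_find_max_min_sum : Prop := ∀ (data : List Int), Dom_find_max_min_sum data → Pre_find_max_min_sum data → Spec_find_max_min_sum data (find_max_min_sum data)

-- ===== LEMMAS AND PROOFS =====

-- A's fold step is (max, min) componentwise.
theorem pvFoldStep_eq (p : Int × Int) (x : Int) :
    pvStepA p x = (max p.1 x, min p.2 x) := by
  simp only [pvStepA, Prod.mk.injEq]
  constructor <;> split <;> omega

theorem pvFold_eq_maxmin (data : List Int) (p : Int × Int) :
    data.foldl pvStepA p = (data.foldl max p.1, data.foldl min p.2) := by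
  induction data generalizing p with
  | nil => rfl
  | cons x xs ih =>
    simp only [List.foldl_cons, pvFoldStep_eq]
    exact ih _

theorem pvFoldlMax_mem (data : List Int) (a : Int) : data.foldl max a = a ∨ data.foldl max a ∈ data := by
  induction data generalizing a with
  | nil => exact Or.inl rfl
  | cons x xs ih =>
    simp only [List.foldl_cons]
    rcases ih (max a x) with h | h
    · rcases max_choice a x with h' | h' <;> rw [h, h']
      · exact Or.inl rfl
      · exact Or.inr (List.mem_cons_self)
    · exact Or.inr (List.mem_cons_of_mem _ h)

theorem pvFoldlMin_mem (data : List Int) (a : Int) : data.foldl min a = a ∨ data.foldl min a ∈ data := by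
  induction data generalizing a with
  | nil => exact Or.inl rfl
  | cons x xs ih =>
    simp only [List.foldl_cons]
    rcases ih (min a x) with h | h
    · rcases min_choice a x with h' | h' <;> rw [h, h']
      · exact Or.inl rfl
      · exact Or.inr (List.mem_cons_self)
    · exact Or.inr (List.mem_cons_of_mem _ h)

theorem pvLe_foldlMax (data : List Int) (a : Int) :
    a ≤ data.foldl max a ∧ ∀ x ∈ data, x ≤ data.foldl max a := by
  induction data generalizing a with
  | nil => simp
  | cons y ys ih =>
    simp only [List.foldl_cons]
    obtain ⟨h1, h2⟩ := ih (max a y)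
    refine ⟨le_trans (le_max_left a y) h1, ?_⟩
    intro x hx
    rcases List.mem_cons.mp hx with rfl | hx
    · exact le_trans (le_max_right a x) h1
    · exact h2 x hx

theorem pvFoldlMin_le (data : List Int) (a : Int) :
    data.foldl min a ≤ a ∧ ∀ x ∈ data, data.foldl min a ≤ x := by
  induction data generalizing a with
  | nil => simp
  | cons y ys ih =>
    simp only [List.foldl_cons]
    obtain ⟨h1, h2⟩ := ih (min a y)
    refine ⟨le_trans h1 (min_le_left a y), ?_⟩
    intro x hx
    rcases List.mem_cons.mp hx with rfl | hx
    · exact le_trans h1 (min_le_right a x)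
    · exact h2 x hx

-- ===== VERDICT (by name: the statement is the Claim_ definition above) =====
theorem find_max_min_sum_spec : Claim_equal_find_max_min_sum := by
  intro data _ hpre
  unfold Spec_find_max_min_sum
  obtain ⟨d0, rest, hdata⟩ : ∃ d0 rest, data = d0 :: rest := by
    cases data with
    | nil => exact absurd rfl hpre
    | cons a l => exact ⟨a, l, rfl⟩
  subst hdata
  set data := d0 :: rest with hdata
  -- A's value
  show (data.foldl pvStepA (d0, d0)).2 + (data.foldl pvStepA (d0, d0)).1 = _
  rw [pvFold_eq_maxmin]
  -- B's value
  have hne : PySem.List.sorted data (fun x => x) false ≠ [] := by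
    intro h; rw [PySem.List.sorted_eq_nil_iff] at h; exact hpre (hdata.trans h)
  obtain ⟨m, t, hs⟩ := List.exists_cons_of_ne_nil hne
  have hmemS : ∀ y : Int, (y ∈ PySem.List.sorted data (fun x => x) false) ↔ y ∈ data := by
    intro y; exact PySem.List.mem_sorted _ _ _ _
  show _ = (match PySem.List.pyGet? (PySem.List.sorted data (fun x => x) false) 0,
                  PySem.List.pyGet? (PySem.List.sorted data (fun x => x) false) (-1) with
            | some a, some b => a + b
            | _, _ => (0 : Int))
  rw [hs, PySem.List.pyGet?_zero_cons, PySem.List.pyGet?_neg_one,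
      List.getLast?_eq_some_getLast (l := m :: t) (by simp)]
  have hlast_mem : (m :: t).getLast (by simp) ∈ (m :: t) := List.getLast_mem _
  have hm_le : ∀ y ∈ data, m ≤ y := PySem.List.key_head_sorted_le data (fun x => x) hs
  have hm_mem : m ∈ data := by rw [← hmemS, hs]; exact List.mem_cons_self
  have hlast_memD : (m :: t).getLast (by simp) ∈ data := by
    rw [← hmemS, hs]; exact hlast_mem
  have hlast_ge : ∀ y ∈ data, y ≤ (m :: t).getLast (by simp) := by
    intro y hy
    have hyS : y ∈ (m :: t) := by rw [← hs, hmemS]; exact hy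
    obtain ⟨p, hp, hpy⟩ := List.getElem_of_mem hyS
    have hmono := PySem.List.sorted_id_getElem_mono (xs := data)
      (p := p) (q := (m :: t).length - 1)
      (by simp at hp ⊢; omega) (by rw [hs]; simp)
    simp only [hs] at hmono
    rw [← hpy, List.getLast_eq_getElem]
    exact hmono
  have hmin : data.foldl min (d0, d0).2 = m := by
    have h1 := pvFoldlMin_le data d0
    have hmemA : data.foldl min d0 ∈ data := by
      rcases pvFoldlMin_mem data d0 with h | h
      · rw [h, hdata]; exact List.mem_cons_self
      · exact h
    have hle1 : m ≤ data.foldl min d0 := hm_le _ hmemA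
    have hle2 : data.foldl min d0 ≤ m := h1.2 m hm_mem
    simp only []
    omega
  have hmax : data.foldl max (d0, d0).1 = (m :: t).getLast (by simp) := by
    have h1 := pvLe_foldlMax data d0
    have hmemA : data.foldl max d0 ∈ data := by
      rcases pvFoldlMax_mem data d0 with h | h
      · rw [h, hdata]; exact List.mem_cons_self
      · exact h
    have hle1 : data.foldl max d0 ≤ (m :: t).getLast (by simp) := hlast_ge _ hmemA
    have hle2 : (m :: t).getLast (by simp) ≤ data.foldl max d0 := h1.2 _ hlast_memD
    simp only []
    omega
  simp only [hmin, hmax]
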